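-- pv_equiv track=rewrite | github.com/W1ndys/DokerLogs2DingTalk | main.py | extract_log_blocks
-- ===== SOURCE A (Python) =====
-- def extract_log_blocks(logs):
--     blocks = []
--     current_block = []
--     in_block = False
--
--     for i in range(1, len(logs) - 1):
--         if (
--             "[info]" in logs[i - 1]
--             and "[info]" in logs[i + 1]
--             and "[info]" not in logs[i]
--         ):
--             if not in_block:
--                 current_block = []
--                 in_block = True
--             current_block.append(logs[i])
--         else:
--             if in_block:
--                 blocks.append(current_block)
--                 in_block = False
--
--     # Add the last block if it was not added
--     if in_block:
--         blocks.append(current_block)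
--
--     return blocks
-- ===== SOURCE B (Python) =====
-- def extract_log_blocks(logs):
--     pos = [k for k, line in enumerate(logs) if "[info]" in line]
--     return [[logs[p + 1]] for p, q in zip(pos, pos[1:]) if q - p == 2]
-- ===== Notes on version B (the rewrite author's own statement) =====
-- stated objective: alternative
-- what changed: B drops A's stateful block-accumulator loop: it collects the indices of '[info]' lines in one pass and emits a singleton block for each consecutive pair of such indices at distance 2 (A's blocks are provably always singletons).
import Mathlib
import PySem

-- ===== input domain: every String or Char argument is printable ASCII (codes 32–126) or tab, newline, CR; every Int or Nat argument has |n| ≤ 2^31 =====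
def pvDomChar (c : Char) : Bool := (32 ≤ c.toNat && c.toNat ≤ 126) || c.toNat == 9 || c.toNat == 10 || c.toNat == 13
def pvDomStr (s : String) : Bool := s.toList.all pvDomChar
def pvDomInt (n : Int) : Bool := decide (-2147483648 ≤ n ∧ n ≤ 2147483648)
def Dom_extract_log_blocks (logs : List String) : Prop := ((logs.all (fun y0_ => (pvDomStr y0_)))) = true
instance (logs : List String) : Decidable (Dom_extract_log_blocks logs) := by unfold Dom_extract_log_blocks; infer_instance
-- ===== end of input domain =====

-- B replaces A's stateful block machine by one pass collecting the "[info]" positions and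
-- emitting a singleton block for each consecutive pair at distance 2 (alternative decomposition, same cost).

-- ===== PORT A =====
-- the loop body of A, named for readability (state = (blocks, current_block, in_block))
def pvBodyA (logs : List String) (st : List (List String) × List String × Bool) (i : Int) :
    List (List String) × List String × Bool :=
  if PySem.Str.isIn "[info]" (PySem.List.pyGetD logs (i - 1) "")
     && PySem.Str.isIn "[info]" (PySem.List.pyGetD logs (i + 1) "")
     && !(PySem.Str.isIn "[info]" (PySem.List.pyGetD logs i "")) then
    -- if not in_block: current_block = []; in_block = True ; current_block.append(logs[i])
    (st.1, (if !st.2.2 then [] else st.2.1) ++ [PySem.List.pyGetD logs i ""], true)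
  else
    -- if in_block: blocks.append(current_block); in_block = False
    if st.2.2 then (st.1 ++ [st.2.1], st.2.1, false) else st

def extract_log_blocks (logs : List String) : List (List String) :=
  let st := (PySem.List.pyRange 1 ((logs.length : Int) - 1) 1).foldl (pvBodyA logs) ([], [], false)
  if st.2.2 then st.1 ++ [st.2.1] else st.1

-- ===== PORT B =====
def extract_log_blocks_alt (logs : List String) : List (List String) :=
  let pos := ((PySem.List.enumerate logs 0).filter (fun kl => PySem.Str.isIn "[info]" kl.2)).map
    (fun kl => kl.1)
  ((pos.zip (PySem.List.slice pos (some 1) none)).filter (fun pq => pq.2 - pq.1 == 2)).map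
    (fun pq => [PySem.List.pyGetD logs (pq.1 + 1) ""])

-- ===== PRECONDITION & SPEC =====
def Spec_extract_log_blocks (logs : List String) (out : List (List String)) : Prop := out = extract_log_blocks_alt logs
instance (logs : List String) (out : List (List String)) : Decidable (Spec_extract_log_blocks logs out) := by unfold Spec_extract_log_blocks; infer_instance

-- ===== CLAIM (what is proved, stated in full; the proofs are below) =====
def Claim_equal_extract_log_blocks : Prop := ∀ (logs : List String), Dom_extract_log_blocks logs → Spec_extract_log_blocks logs (extract_log_blocks logs)

-- ===== LEMMAS AND PROOFS =====

-- "[info]" in s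
def infoB (s : String) : Bool := PySem.Str.isIn "[info]" s

-- indices s+1+k of the middle lines of qualifying windows (info, non-info, info)
def Qidx (f : String → Bool) : List String → Int → List Int
  | a :: b :: c :: t, s => (if f a && f c && !f b then [s + 1] else []) ++ Qidx f (b :: c :: t) (s + 1)
  | _, _ => []

-- positions (starting at s) of the lines satisfying f
def posF (f : String → Bool) : List String → Int → List Int
  | [], _ => []
  | a :: t, s => (if f a then [s] else []) ++ posF f t (s + 1)

-- middle index of each adjacent pair at distance 2
def pairs : List Int → List Int
  | a :: b :: t => (if b - a == 2 then [a + 1] else []) ++ pairs (b :: t)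
  | _ => []

lemma Qidx_short (f : String → Bool) (l : List String) (s : Int) (h : l.length ≤ 2) :
    Qidx f l s = [] := by
  match l with
  | [] => rfl
  | [_] => rfl
  | [_, _] => rfl
  | _ :: _ :: _ :: _ => simp at h

lemma posF_spec (f : String → Bool) (l : List String) :
    ∀ s : Int, ((PySem.List.enumerate l s).filter (fun kl => f kl.2)).map (fun kl => kl.1)
      = posF f l s := by
  induction l with
  | nil => intro s; simp [posF, PySem.List.enumerate_nil]
  | cons a t ih =>
    intro s
    by_cases h : f a <;>
      simp [PySem.List.enumerate_cons, h, posF, ih]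

lemma posF_ge (f : String → Bool) (l : List String) :
    ∀ (s x : Int), x ∈ posF f l s → s ≤ x := by
  induction l with
  | nil => intro s x h; simp [posF] at h
  | cons a t ih =>
    intro s x h
    by_cases hfa : f a <;> simp [posF, hfa] at h
    · rcases h with h | h
      · omega
      · have := ih (s + 1) x h; omega
    · have := ih (s + 1) x h; omega

lemma pairs_zip (l : List Int) :
    ((l.zip l.tail).filter (fun pq => pq.2 - pq.1 == 2)).map (fun pq => pq.1 + 1) = pairs l := by
  induction l with
  | nil => rfl
  | cons a t ih =>
    cases t with
    | nil => rfl
    | cons b t' =>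
      by_cases h : b - a == 2 <;>
        simp_all [pairs, List.zip_cons_cons]

lemma pairs_cons_of_ge (a : Int) (r : List Int) (h : ∀ x ∈ r, a + 3 ≤ x) :
    pairs (a :: r) = pairs r := by
  cases r with
  | nil => rfl
  | cons h' r' =>
    have : ¬ (h' - a == 2) = true := by
      have := h h' (by simp); simp; omega
    simp [pairs, this]

lemma pairs_posF (f : String → Bool) (l : List String) :
    ∀ s : Int, pairs (posF f l s) = Qidx f l s := by
  induction l with
  | nil => intro s; rfl
  | cons a t ih =>
    intro s
    by_cases hfa : f a
    · cases t with
      | nil => simp [posF, hfa, pairs, Qidx]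
      | cons b t' =>
        by_cases hfb : f b
        · -- gap 1: contributes nothing
          have : pairs (posF f (a :: b :: t') s) = pairs (posF f (b :: t') (s + 1)) := by
            simp [posF, hfa, hfb, pairs]
          rw [this, ih (s + 1)]
          cases t' with
          | nil => rfl
          | cons c t'' => simp [Qidx, hfb]
        · cases t' with
          | nil => simp [posF, hfa, hfb, pairs, Qidx]
          | cons c t'' =>
            by_cases hfc : f c
            · -- qualifying window: gap exactly 2
              have h1 : posF f (a :: b :: c :: t'') s
                  = s :: (s + 2) :: posF f t'' (s + 3) := by
                simp [posF, hfa, hfb, hfc]; ring_nf; try exact ⟨trivial, trivial⟩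
              have h2 : posF f (b :: c :: t'') (s + 1)
                  = (s + 2) :: posF f t'' (s + 3) := by
                simp [posF, hfb, hfc]; ring_nf; try exact ⟨trivial, trivial⟩
              rw [h1, show pairs (s :: (s + 2) :: posF f t'' (s + 3))
                    = [s + 1] ++ pairs ((s + 2) :: posF f t'' (s + 3)) by simp [pairs],
                  ← h2, ih (s + 1)]
              simp [Qidx, hfa, hfb, hfc]
            · -- a info, b c not: next position ≥ s+3, no pair at distance 2
              have h1 : posF f (a :: b :: c :: t'') s = s :: posF f t'' (s + 3) := by
                simp [posF, hfa, hfb, hfc]; ring_nf; try exact ⟨trivial, trivial⟩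
              have h2 : posF f (b :: c :: t'') (s + 1) = posF f t'' (s + 3) := by
                simp [posF, hfb, hfc]; ring_nf; try exact ⟨trivial, trivial⟩
              rw [h1, pairs_cons_of_ge s _ (by intro x hx; exact posF_ge f t'' (s + 3) x hx),
                  ← h2, ih (s + 1)]
              simp [Qidx, hfc]
    · -- a not info: no window starts here
      have h1 : posF f (a :: t) s = posF f t (s + 1) := by simp [posF, hfa]
      rw [h1, ih (s + 1)]
      cases t with
      | nil => rfl
      | cons b t' =>
        cases t' with
        | nil => rfl
        | cons c t'' => simp [Qidx, hfa]

lemma drop_cons_getD {α : Type} (l : List α) (k : Nat) (x : α) (r : List α) (d : α)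
    (h : l.drop k = x :: r) : l.getD k d = x := by
  have h1 : (l.drop k)[0]? = some x := by rw [h]; rfl
  rw [List.getElem?_drop] at h1
  simp at h1
  simp [List.getD_eq_getElem?_getD, h1]

lemma drop_succ_of_drop_cons {α : Type} (l : List α) (k : Nat) (x : α) (r : List α)
    (h : l.drop k = x :: r) : l.drop (k + 1) = r := by
  rw [← List.tail_drop, h]
  rfl

lemma A_loop (logs : List String) :
    ∀ (l : List String) (i : Nat) (blocks : List (List String)) (cur : List String) (inb : Bool),
      1 ≤ i → logs.drop (i - 1) = l →
      (inb = true → infoB (logs.getD i "") = true) →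
      (let st := (PySem.List.pyRange (i : Int) ((logs.length : Int) - 1) 1).foldl
          (pvBodyA logs) (blocks, cur, inb)
       if st.2.2 then st.1 ++ [st.2.1] else st.1)
      = blocks ++ (if inb then [cur] else [])
          ++ (Qidx infoB l ((i : Int) - 1)).map (fun j => [PySem.List.pyGetD logs j ""]) := by
  intro l
  induction l with
  | nil =>
    intro i blocks cur inb hi hdrop hinv
    have hlen : logs.length ≤ i - 1 := List.drop_eq_nil_iff.mp hdrop
    rw [PySem.List.pyRange_one_eq_nil (by omega)]
    cases inb <;> simp [Qidx]
  | cons a l' ih =>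
    intro i blocks cur inb hi hdrop hinv
    by_cases hlt : (i : Int) < (logs.length : Int) - 1
    · have hlen : logs.length - (i - 1) = l'.length + 1 := by
        have := congrArg List.length hdrop
        simpa using this
      obtain ⟨b, l'', rfl⟩ : ∃ b l'', l' = b :: l'' := by
        cases l' with
        | nil => exfalso; simp at hlen; omega
        | cons b l'' => exact ⟨b, l'', rfl⟩
      obtain ⟨c, t, rfl⟩ : ∃ c t, l'' = c :: t := by
        cases l'' with
        | nil => exfalso; simp at hlen; omega
        | cons c t => exact ⟨c, t, rfl⟩
      have ha : logs.getD (i - 1) "" = a := drop_cons_getD _ _ _ _ _ hdrop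
      have hdrop2 : logs.drop i = b :: c :: t := by
        have := drop_succ_of_drop_cons _ _ _ _ hdrop
        rwa [Nat.sub_add_cancel hi] at this
      have hb : logs.getD i "" = b := drop_cons_getD _ _ _ _ _ hdrop2
      have hdrop3 : logs.drop (i + 1) = c :: t := drop_succ_of_drop_cons _ _ _ _ hdrop2
      have hc : logs.getD (i + 1) "" = c := drop_cons_getD _ _ _ _ _ hdrop3
      have gi1 : PySem.List.pyGetD logs ((i : Int) - 1) "" = a := by
        rw [show ((i : Int) - 1) = ((i - 1 : Nat) : Int) by omega, PySem.List.pyGetD_natCast]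
        exact ha
      have gi : PySem.List.pyGetD logs (i : Int) "" = b := by
        rw [PySem.List.pyGetD_natCast]; exact hb
      have gi2 : PySem.List.pyGetD logs ((i : Int) + 1) "" = c := by
        rw [show ((i : Int) + 1) = ((i + 1 : Nat) : Int) by omega, PySem.List.pyGetD_natCast]
        exact hc
      rw [PySem.List.pyRange_one_cons hlt]
      simp only [List.foldl_cons]
      cases hq : (infoB a && infoB c && !infoB b) with
      | true =>
        obtain ⟨⟨ha', hc'⟩, hb'⟩ : (infoB a = true ∧ infoB c = true) ∧ infoB b = false := by
          have := hq; simp only [Bool.and_eq_true, Bool.not_eq_eq_eq_not, Bool.not_true] at this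
          exact ⟨⟨this.1.1, this.1.2⟩, this.2⟩
        have hinb : inb = false := by
          cases inb with
          | false => rfl
          | true => exact absurd (hb ▸ hinv rfl) (by simp [hb'])
        subst hinb
        have hbody : pvBodyA logs (blocks, cur, false) (i : Int)
            = (blocks, [PySem.List.pyGetD logs (i : Int) ""], true) := by
          have hq2 := hq
          simp only [infoB] at hq2
          simp only [pvBodyA, gi1, gi, gi2, hq2]
          simp
        rw [hbody]
        have ih' := ih (i + 1) blocks [PySem.List.pyGetD logs (i : Int) ""] true
          (by omega) (by rw [Nat.add_sub_cancel]; exact hdrop2)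
          (fun _ => by rw [hc]; exact hc')
        push_cast at ih'
        rw [show ((i : Int) + 1 - 1) = (i : Int) by ring] at ih'
        rw [ih']
        simp [Qidx, ha', hc', hb', show ((i : Int) - 1 + 1) = (i : Int) by ring, gi]
      | false =>
        have hq' : (infoB a && infoB c && !infoB b) = false := hq
        cases inb with
        | true =>
          have hstep : pvBodyA logs (blocks, cur, true) (i : Int) = (blocks ++ [cur], cur, false) := by
            have hq2 := hq
            simp only [infoB] at hq2
            simp only [pvBodyA, gi1, gi, gi2, hq2]
            simp
          rw [hstep]
          have ih' := ih (i + 1) (blocks ++ [cur]) cur false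
            (by omega) (by rw [Nat.add_sub_cancel]; exact hdrop2) (by simp)
          push_cast at ih'
          rw [show ((i : Int) + 1 - 1) = (i : Int) by ring] at ih'
          rw [ih']
          simp [Qidx, hq', show ((i : Int) - 1 + 1) = (i : Int) by ring]
        | false =>
          have hstep : pvBodyA logs (blocks, cur, false) (i : Int) = (blocks, cur, false) := by
            have hq2 := hq
            simp only [infoB] at hq2
            simp only [pvBodyA, gi1, gi, gi2, hq2]
            simp
          rw [hstep]
          have ih' := ih (i + 1) blocks cur false
            (by omega) (by rw [Nat.add_sub_cancel]; exact hdrop2) (by simp)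
          push_cast at ih'
          rw [show ((i : Int) + 1 - 1) = (i : Int) by ring] at ih'
          rw [ih']
          simp [Qidx, hq', show ((i : Int) - 1 + 1) = (i : Int) by ring]
    · rw [PySem.List.pyRange_one_eq_nil (by omega)]
      have hlen : logs.length - (i - 1) = (a :: l').length := by
        have := congrArg List.length hdrop
        simpa using this
      have hshort : (a :: l').length ≤ 2 := by simp at hlen ⊢; omega
      rw [Qidx_short _ _ _ hshort]
      cases inb <;> simp

lemma A_eq (logs : List String) :
    extract_log_blocks logs
      = (Qidx infoB logs 0).map (fun j => [PySem.List.pyGetD logs j ""]) := by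
  have := A_loop logs logs 1 [] [] false (le_refl 1) (by simp) (by simp)
  simpa [extract_log_blocks] using this

lemma B_eq (logs : List String) :
    extract_log_blocks_alt logs
      = (Qidx infoB logs 0).map (fun j => [PySem.List.pyGetD logs j ""]) := by
  simp only [extract_log_blocks_alt]
  rw [PySem.List.slice_from_one]
  rw [show (fun pq : Int × Int => [PySem.List.pyGetD logs (pq.1 + 1) ""])
        = (fun j : Int => [PySem.List.pyGetD logs j ""]) ∘ (fun pq : Int × Int => pq.1 + 1)
      from rfl]
  rw [← List.map_map, pairs_zip, posF_spec, pairs_posF]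
  rfl

-- ===== VERDICT (by name: the statement is the Claim_ definition above) =====
theorem extract_log_blocks_spec : Claim_equal_extract_log_blocks := by
  intro logs _
  unfold Spec_extract_log_blocks
  rw [A_eq, B_eq]
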